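-- pv_equiv track=rewrite | github.com/VishnuPriyaAthukuri1109/Major-Project | app.py | calculate_gad7
-- ===== SOURCE A (Python) =====
-- def calculate_gad7(form_data):
--
--     gad_score = sum(int(form_data.get(f'gad{i}', 0)) for i in range(1, 8))
--
--     if gad_score <= 4:
--         level = "Minimal Anxiety"
--     elif gad_score <= 9:
--         level = "Mild Anxiety"
--     elif gad_score <= 14:
--         level = "Moderate Anxiety"
--     else:
--         level = "Severe Anxiety"
--
--     return gad_score, level
-- ===== SOURCE B (Python) =====
-- def calculate_gad7(form_data):
--     # one pass over the submitted items with a wanted-key set,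
--     # instead of seven separate dict lookups
--     wanted = {'gad%d' % i for i in range(1, 8)}
--     gad_score = 0
--     for key, value in form_data.items():
--         if key in wanted:
--             gad_score += int(value)
--     # severity band from a (threshold, label) table with early return
--     for limit, label in ((4, "Minimal Anxiety"),
--                          (9, "Mild Anxiety"),
--                          (14, "Moderate Anxiety")):
--         if gad_score <= limit:
--             return gad_score, label
--     return gad_score, "Severe Anxiety"
-- ===== Notes on version B (the rewrite author's own statement) =====
-- stated objective: alternative
-- what changed: B inverts the traversal: instead of seven dict lookups it makes one pass over form_data's items accumulating values whose key is in a precomputed wanted-set, and picks the severity label by scanning a (threshold,label) table with early return instead of an if/elif ladder.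
import Mathlib
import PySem

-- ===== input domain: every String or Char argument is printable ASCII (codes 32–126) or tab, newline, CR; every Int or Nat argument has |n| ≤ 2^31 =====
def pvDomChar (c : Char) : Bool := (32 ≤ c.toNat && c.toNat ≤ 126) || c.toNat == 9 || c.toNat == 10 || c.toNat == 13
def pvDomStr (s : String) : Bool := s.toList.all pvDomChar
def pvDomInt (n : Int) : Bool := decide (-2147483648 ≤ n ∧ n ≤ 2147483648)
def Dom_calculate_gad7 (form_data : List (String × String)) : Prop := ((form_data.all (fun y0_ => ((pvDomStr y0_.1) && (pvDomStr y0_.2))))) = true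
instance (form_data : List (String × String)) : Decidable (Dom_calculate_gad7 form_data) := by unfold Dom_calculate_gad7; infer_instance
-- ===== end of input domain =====

-- B makes one pass over form_data's items with a wanted-key set instead of seven dict lookups, and picks the label from a (threshold,label) table instead of an if/elif ladder; alternative decomposition, same cost.


-- ===== PORT A =====
-- form_data.get(key, 0) on the association list: first match; int(v) → PySem.Int.ofStr? (Pre_ guarantees it parses, so the getD 0 branch is never taken)
def pvGetInt (form_data : List (String × String)) (key : String) : Int :=
  match (form_data.find? (fun p => p.1 == key)).map Prod.snd with
  | none => 0
  | some s => (PySem.Int.ofStr? s).getD 0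

def calculate_gad7 (form_data : List (String × String)) : Int × String :=
  let gad_score : Int :=
    (PySem.List.pyRange 1 8 1).foldl
      (fun acc i => acc + pvGetInt form_data ("gad" ++ PySem.Int.toStr i)) 0
  let level : String :=
    if gad_score ≤ 4 then "Minimal Anxiety"
    else if gad_score ≤ 9 then "Mild Anxiety"
    else if gad_score ≤ 14 then "Moderate Anxiety"
    else "Severe Anxiety"
  (gad_score, level)

-- ===== PORT B =====
-- wanted = {'gad%d' % i for i in range(1, 8)}
def pvWanted : PySem.Set String :=
  PySem.Set.ofList ((PySem.List.pyRange 1 8 1).map (fun i => "gad" ++ PySem.Int.toStr i))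

-- the (threshold, label) table loop with early return
def pvPickLevel (s : Int) : List (Int × String) → String
  | [] => "Severe Anxiety"
  | (t, l) :: rest => if s ≤ t then l else pvPickLevel s rest

def calculate_gad7_alt (form_data : List (String × String)) : Int × String :=
  let gad_score : Int :=
    form_data.foldl
      (fun acc p => if PySem.Set.contains pvWanted p.1 then acc + (PySem.Int.ofStr? p.2).getD 0 else acc) 0
  (gad_score,
   pvPickLevel gad_score [(4, "Minimal Anxiety"), (9, "Mild Anxiety"), (14, "Moderate Anxiety")])

-- ===== PRECONDITION & SPEC =====
-- Pre_ excludes (a) inputs where Python's int() raises ValueError (a gad1..gad7 value that does not parse)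
-- and (b) association lists with a duplicated gad1..gad7 key, which do not faithfully represent any Python
-- dict (a dict keeps only the last value per key, so first-match assoc lookup is an artefact of the encoding).
def pvGadKeys : List String := ["gad1","gad2","gad3","gad4","gad5","gad6","gad7"]

def Pre_calculate_gad7 (form_data : List (String × String)) : Prop :=
  (∀ p ∈ form_data, p.1 ∈ pvGadKeys → (PySem.Int.ofStr? p.2).isSome = true) ∧
  (∀ k ∈ pvGadKeys, (form_data.filter (fun p => p.1 == k)).length ≤ 1)
instance (form_data : List (String × String)) : Decidable (Pre_calculate_gad7 form_data) := by
  unfold Pre_calculate_gad7; infer_instance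

def pvWitness_calculate_gad7 : (List (String × String)) := [("gad1", "3"), ("gad2", " +4 "), ("other", "x")]

def Spec_calculate_gad7 (form_data : List (String × String)) (out : Int × String) : Prop := out = calculate_gad7_alt form_data
instance (form_data : List (String × String)) (out : Int × String) : Decidable (Spec_calculate_gad7 form_data out) := by unfold Spec_calculate_gad7; infer_instance

-- ===== CLAIM =====
def Claim_equal_calculate_gad7 : Prop := ∀ (form_data : List (String × String)), Dom_calculate_gad7 form_data → Pre_calculate_gad7 form_data → Spec_calculate_gad7 form_data (calculate_gad7 form_data)

-- ===== LEMMAS AND PROOFS =====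
-- membership in the built wanted-set is membership in the literal key list
theorem pvWanted_mem (k : String) : PySem.Set.contains pvWanted k = decide (k ∈ pvGadKeys) := by
  have h : pvWanted = pvGadKeys := by decide
  rw [h, PySem.Set.contains]
  simp

-- sum over a nodup list of keys when two functions differ only at one key
theorem pvSum_update (l : List String) (hl : l.Nodup) (a : String) (ha : a ∈ l)
    (f g : String → Int) (hfg : ∀ k ∈ l, k ≠ a → f k = g k) :
    (l.map f).sum = (l.map g).sum + (f a - g a) := by
  induction l with
  | nil => cases ha
  | cons b t ih =>
    rcases List.mem_cons.mp ha with rfl | hat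
    · have : ∀ k ∈ t, f k = g k := by
        intro k hk
        exact hfg k (List.mem_cons_of_mem _ hk) (fun hkb => (List.nodup_cons.mp hl).1 (hkb ▸ hk))
      simp only [List.map_cons, List.sum_cons, List.map_congr_left this]
      ring
    · have hba : b ≠ a := fun h => (List.nodup_cons.mp hl).1 (h ▸ hat)
      have := ih (List.nodup_cons.mp hl).2 hat
        (fun k hk hka => hfg k (List.mem_cons_of_mem _ hk) hka)
      simp only [List.map_cons, List.sum_cons, this, hfg b (List.mem_cons_self) hba]
      ring

-- first-match lookup is unchanged by a head with a different key
theorem pvGetInt_cons_ne (p : String × String) (fd : List (String × String)) (k : String)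
    (h : p.1 ≠ k) : pvGetInt (p :: fd) k = pvGetInt fd k := by
  simp [pvGetInt, h]

-- first-match lookup at the head's key
theorem pvGetInt_cons_self (p : String × String) (fd : List (String × String)) :
    pvGetInt (p :: fd) p.1 = (PySem.Int.ofStr? p.2).getD 0 := by
  simp [pvGetInt]

-- no pair with key k ⇒ lookup is 0
theorem pvGetInt_eq_zero (fd : List (String × String)) (k : String)
    (h : ∀ p ∈ fd, p.1 ≠ k) : pvGetInt fd k = 0 := by
  have : fd.find? (fun p => p.1 == k) = none :=
    List.find?_eq_none.mpr (fun p hp => by simpa using h p hp)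
  simp [pvGetInt, this]

-- core: B's single pass over the items equals the sum of the seven first-match lookups,
-- provided no gad key occurs twice
theorem pvSum_eq (fd : List (String × String))
    (h : ∀ k ∈ pvGadKeys, (fd.filter (fun p => p.1 == k)).length ≤ 1) :
    (fd.map (fun p => if p.1 ∈ pvGadKeys then (PySem.Int.ofStr? p.2).getD 0 else 0)).sum
      = (pvGadKeys.map (pvGetInt fd)).sum := by
  induction fd with
  | nil =>
    simp [pvGadKeys, pvGetInt]
  | cons p fd ih =>
    have hrest : ∀ k ∈ pvGadKeys, ((fd.filter (fun q => q.1 == k)).length ≤ 1) := by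
      intro k hk
      have := h k hk
      rw [List.filter_cons] at this
      by_cases hpk : (p.1 == k) = true
      · rw [if_pos hpk, List.length_cons] at this; omega
      · rw [if_neg (by simp [hpk])] at this; exact this
    by_cases hp : p.1 ∈ pvGadKeys
    · -- head is a gad key; it occurs nowhere in fd
      have hnone : ∀ q ∈ fd, q.1 ≠ p.1 := by
        intro q hq hqp
        have := h p.1 hp
        have h1 : (0 : Nat) < (fd.filter (fun r => r.1 == p.1)).length :=
          List.length_pos_of_mem (List.mem_filter.mpr ⟨hq, by simpa using hqp⟩)
        rw [List.filter_cons, if_pos (by simp), List.length_cons] at this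
        omega
      have hzero : pvGetInt fd p.1 = 0 := pvGetInt_eq_zero fd p.1 hnone
      have hfg : ∀ k ∈ pvGadKeys, k ≠ p.1 → pvGetInt (p :: fd) k = pvGetInt fd k := by
        intro k _ hk
        exact pvGetInt_cons_ne p fd k (fun h' => hk h'.symm)
      have hnodup : pvGadKeys.Nodup := by decide
      have := pvSum_update pvGadKeys hnodup p.1 hp (pvGetInt (p :: fd)) (pvGetInt fd) hfg
      rw [List.map_cons, List.sum_cons, if_pos hp, ih hrest, this,
        pvGetInt_cons_self, hzero]
      ring
    · have hfg : ∀ k ∈ pvGadKeys, pvGetInt (p :: fd) k = pvGetInt fd k := by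
        intro k hk
        exact pvGetInt_cons_ne p fd k (fun h' => hp (h' ▸ hk))
      rw [List.map_cons, List.sum_cons, if_neg hp, ih hrest, List.map_congr_left hfg]
      ring

-- B's foldl as a map-sum
theorem pvFold_eq_sum (fd : List (String × String)) :
    fd.foldl (fun acc p => if PySem.Set.contains pvWanted p.1 then acc + (PySem.Int.ofStr? p.2).getD 0 else acc) 0
      = (fd.map (fun p => if p.1 ∈ pvGadKeys then (PySem.Int.ofStr? p.2).getD 0 else 0)).sum := by
  have : ∀ (acc : Int), fd.foldl (fun acc p => if PySem.Set.contains pvWanted p.1 then acc + (PySem.Int.ofStr? p.2).getD 0 else acc) acc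
      = acc + (fd.map (fun p => if p.1 ∈ pvGadKeys then (PySem.Int.ofStr? p.2).getD 0 else 0)).sum := by
    induction fd with
    | nil => simp
    | cons p fd ih =>
      intro acc
      rw [List.foldl_cons, ih, List.map_cons, List.sum_cons, pvWanted_mem]
      by_cases hp : p.1 ∈ pvGadKeys
      · rw [if_pos (by simpa using hp), if_pos hp]; ring
      · rw [if_neg (by simpa using hp), if_neg hp]; ring
  simpa using this 0

-- A's foldl over pyRange as the same map-sum over the literal key list
theorem pvASum_eq (fd : List (String × String)) :
    (PySem.List.pyRange 1 8 1).foldl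
      (fun acc i => acc + pvGetInt fd ("gad" ++ PySem.Int.toStr i)) 0
      = (pvGadKeys.map (pvGetInt fd)).sum := by
  have h : PySem.List.pyRange 1 8 1 = [1, 2, 3, 4, 5, 6, 7] := by decide
  have h1 : ("gad" ++ PySem.Int.toStr 1) = "gad1" := by decide
  have h2 : ("gad" ++ PySem.Int.toStr 2) = "gad2" := by decide
  have h3 : ("gad" ++ PySem.Int.toStr 3) = "gad3" := by decide
  have h4 : ("gad" ++ PySem.Int.toStr 4) = "gad4" := by decide
  have h5 : ("gad" ++ PySem.Int.toStr 5) = "gad5" := by decide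
  have h6 : ("gad" ++ PySem.Int.toStr 6) = "gad6" := by decide
  have h7 : ("gad" ++ PySem.Int.toStr 7) = "gad7" := by decide
  simp only [h, List.foldl_cons, List.foldl_nil, h1, h2, h3, h4, h5, h6, h7,
    pvGadKeys, List.map_cons, List.map_nil, List.sum_cons, List.sum_nil]
  ring

-- A's if/elif ladder equals B's table loop for every score
theorem pvLevel_eq (s : Int) :
    (if s ≤ 4 then "Minimal Anxiety"
     else if s ≤ 9 then "Mild Anxiety"
     else if s ≤ 14 then "Moderate Anxiety"
     else "Severe Anxiety")
    = pvPickLevel s [(4, "Minimal Anxiety"), (9, "Mild Anxiety"), (14, "Moderate Anxiety")] := by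
  simp [pvPickLevel]

-- ===== VERDICT =====
theorem calculate_gad7_spec : Claim_equal_calculate_gad7 := by
  intro fd _ hpre
  unfold Spec_calculate_gad7 calculate_gad7 calculate_gad7_alt
  have hsum : (PySem.List.pyRange 1 8 1).foldl
      (fun acc i => acc + pvGetInt fd ("gad" ++ PySem.Int.toStr i)) 0
      = fd.foldl (fun acc p => if PySem.Set.contains pvWanted p.1 then acc + (PySem.Int.ofStr? p.2).getD 0 else acc) 0 := by
    rw [pvASum_eq, pvFold_eq_sum, pvSum_eq fd hpre.2]
  simp only [hsum, pvLevel_eq]
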